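-- pv_equiv track=rewrite | github.com/moritzkoerber/adventofcode | python/2022/day08.py | calculate_visibility
-- ===== SOURCE A (Python) =====
-- def calculate_visibility(tree_row: str) -> list[bool]:
--     m = max(tree_row)
--     return [
--         (i == 0)
--         or (i == len(tree_row) - 1)
--         or (i <= tree_row.index(m) and j > max(tree_row[:i]))
--         or (i >= tree_row.rfind(m) and j > max(tree_row[i + 1 :]))
--         for i, j in enumerate(tree_row)
--     ]
-- ===== SOURCE B (Python) =====
-- def calculate_visibility(tree_row: str) -> list[bool]:
--     # One pass left-to-right and one right-to-left, carrying a running maximum: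
--     # prefix[i] = max of tree_row[:i], suffix[i] = max of tree_row[i+1:]
--     # ('\x00' sentinel stands for the max of an empty stretch; it is below every char).
--     prefix = []
--     run = "\x00"
--     for c in tree_row:
--         prefix.append(run)
--         run = c if run < c else run
--     suffix = []
--     run = "\x00"
--     for c in reversed(tree_row):
--         suffix.append(run)
--         run = c if run < c else run
--     suffix.reverse()
--     n = len(tree_row)
--     return [i == 0 or i == n - 1 or c > prefix[i] or c > suffix[i]
--             for i, c in enumerate(tree_row)]
-- ===== Notes on version B (the rewrite author's own statement) =====
-- stated objective: faster
-- what changed: Replaced the per-index max(tree_row[:i])/max(tree_row[i+1:]) recomputation (plus the redundant index/rfind guards, which are provably no-ops) by two linear running-maximum sweeps that precompute prefix-max and suffix-max arrays.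
import Mathlib
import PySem

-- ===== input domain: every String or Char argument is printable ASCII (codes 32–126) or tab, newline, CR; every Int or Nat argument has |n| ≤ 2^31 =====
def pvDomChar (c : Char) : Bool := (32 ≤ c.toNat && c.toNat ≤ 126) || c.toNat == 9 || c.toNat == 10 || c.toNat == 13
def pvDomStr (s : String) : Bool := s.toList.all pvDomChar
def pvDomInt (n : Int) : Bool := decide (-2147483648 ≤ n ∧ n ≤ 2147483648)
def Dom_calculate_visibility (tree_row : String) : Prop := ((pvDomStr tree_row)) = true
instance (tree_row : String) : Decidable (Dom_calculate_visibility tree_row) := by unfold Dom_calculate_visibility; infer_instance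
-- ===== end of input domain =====

-- B replaces A's per-index max(tree_row[:i]) / max(tree_row[i+1:]) recomputation by two
-- linear running-maximum sweeps (prefix-max and suffix-max arrays); A's index/rfind guards
-- are provably redundant.  Return values agree on every nonempty string (A raises on "").

-- ===== PORT A =====
-- tree_row.index(m) is ported as Chars.find: m = max(tree_row) always occurs, so index
-- never raises and equals find there.  The .getD m default on the two slice maxima is hit
-- only where Python's 'or'/'and' short-circuits past the raising max() call (i = 0 resp.
-- i = len-1); there m < j is false, exactly like Python's short-circuited disjunct.
def calculate_visibility (tree_row : String) : List Bool :=
  let s := tree_row.toList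
  match PySem.List.max? s (fun x => x) with
  | none => []   -- Python: max('') raises ValueError here; excluded by Pre_
  | some m =>
    let f : Int := PySem.Chars.find s [m]
    let r : Int := PySem.Chars.rfind s [m]
    (PySem.List.enumerate s 0).map (fun ij =>
      decide (ij.1 = 0) ||
      decide (ij.1 = (s.length : Int) - 1) ||
      (decide (ij.1 ≤ f) &&
        decide (((PySem.List.max? (PySem.List.slice s none (some ij.1)) (fun x => x)).getD m) < ij.2)) ||
      (decide (r ≤ ij.1) &&
        decide (((PySem.List.max? (PySem.List.slice s (some (ij.1 + 1)) none) (fun x => x)).getD m) < ij.2)))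

-- ===== PORT B =====
-- literal transliteration of Source B: two append-loops carrying a running maximum, then one
-- comprehension over enumerate indexing the two precomputed arrays.
def calculate_visibility_alt (tree_row : String) : List Bool :=
  let s := tree_row.toList
  let pr := s.foldl (fun (acc : List Char × Char) c =>
      (acc.1 ++ [acc.2], if acc.2 < c then c else acc.2)) ([], '\x00')
  let pref := pr.1
  let sr := s.reverse.foldl (fun (acc : List Char × Char) c =>
      (acc.1 ++ [acc.2], if acc.2 < c then c else acc.2)) ([], '\x00')
  let suf := sr.1.reverse
  let n := s.length
  (PySem.List.enumerate s 0).map (fun ic =>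
    decide (ic.1 = 0) ||
    decide (ic.1 = (n : Int) - 1) ||
    decide (PySem.List.pyGetD pref ic.1 '\x00' < ic.2) ||
    decide (PySem.List.pyGetD suf ic.1 '\x00' < ic.2))

-- ===== PRECONDITION & SPEC =====
-- Pre_ excludes only the empty string, on which Python A raises ValueError (max of empty sequence).
def Pre_calculate_visibility (tree_row : String) : Prop := tree_row ≠ ""
instance (tree_row : String) : Decidable (Pre_calculate_visibility tree_row) := by unfold Pre_calculate_visibility; infer_instance
def pvWitness_calculate_visibility : String := "30373"

def Spec_calculate_visibility (tree_row : String) (out : List Bool) : Prop := out = calculate_visibility_alt tree_row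
instance (tree_row : String) (out : List Bool) : Decidable (Spec_calculate_visibility tree_row out) := by unfold Spec_calculate_visibility; infer_instance

-- ===== CLAIM (what is proved, stated in full; the proofs are below) =====
def Claim_equal_calculate_visibility : Prop := ∀ (tree_row : String), Dom_calculate_visibility tree_row → Pre_calculate_visibility tree_row → Spec_calculate_visibility tree_row (calculate_visibility tree_row)

-- ===== LEMMAS AND PROOFS =====

-- the pure shape of B's append-loop
def prefMaxes (z : Char) : List Char → List Char
  | [] => []
  | c :: t => z :: prefMaxes (max z c) t

theorem prefMaxes_length (z : Char) (s : List Char) : (prefMaxes z s).length = s.length := by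
  induction s generalizing z with
  | nil => rfl
  | cons c t ih => simp [prefMaxes, ih]

theorem scan_fold (s : List Char) (acc0 : List Char) (z : Char) :
    s.foldl (fun (acc : List Char × Char) c =>
      (acc.1 ++ [acc.2], if acc.2 < c then c else acc.2)) (acc0, z)
    = (acc0 ++ prefMaxes z s, s.foldl max z) := by
  induction s generalizing acc0 z with
  | nil => simp [prefMaxes]
  | cons c t ih =>
    simp only [List.foldl_cons, prefMaxes]
    rw [ih]
    have h : (if z < c then c else z) = max z c := by
      by_cases h : z < c
      · simp [h, max_eq_right h.le]
      · simp [h, max_eq_left (not_lt.mp h)]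
    simp [h]

theorem prefMaxes_getElem (z : Char) (s : List Char) (k : Nat) (hk : k < s.length) :
    (prefMaxes z s)[k]'(by rw [prefMaxes_length]; exact hk) = (s.take k).foldl max z := by
  induction s generalizing z k with
  | nil => simp at hk
  | cons c t ih =>
    cases k with
    | zero => simp [prefMaxes]
    | succ k =>
      simp only [prefMaxes, List.getElem_cons_succ, List.take_succ_cons, List.foldl_cons]
      exact ih _ k (by simpa using hk)

theorem foldl_max_pull (t : List Char) (z c : Char) :
    t.foldl max (max z c) = max (t.foldl max z) c := by
  induction t generalizing z with
  | nil => rfl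
  | cons d t ih =>
    simp only [List.foldl_cons]
    rw [show max (max z c) d = max (max z d) c by rw [max_right_comm], ih]

theorem foldl_max_reverse (z : Char) (s : List Char) :
    s.reverse.foldl max z = s.foldl max z := by
  induction s generalizing z with
  | nil => rfl
  | cons c t ih =>
    simp only [List.reverse_cons, List.foldl_append, List.foldl_cons, List.foldl_nil, ih]
    rw [← foldl_max_pull]

-- every Char is at least '\x00'
theorem nul_le (c : Char) : '\x00' ≤ c := by
  show ('\x00' : Char).val ≤ c.val
  exact UInt32.le_iff_toNat_le.mpr (Nat.zero_le _)

theorem foldl_max_nul (c : Char) (t : List Char) :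
    (c :: t).foldl max '\x00' = t.foldl max c := by
  simp only [List.foldl_cons, max_eq_right (nul_le c)]

-- rfind on a singleton pattern: nonnegative and pointing at an occurrence whenever one exists
theorem rfind_go_spec (s : List Char) (m : Char) (j : Nat)
    (h : ∃ i, i ≤ j ∧ [m].isPrefixOf (s.drop i)) :
    0 ≤ PySem.Chars.rfind.go s [m] j ∧
      [m].isPrefixOf (s.drop (PySem.Chars.rfind.go s [m] j).toNat) := by
  induction j with
  | zero =>
    obtain ⟨i, hi, hp⟩ := h
    have hi0 : i = 0 := Nat.le_zero.mp hi
    subst hi0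
    rw [PySem.Chars.rfind.go]
    simp only [List.drop_zero] at hp
    simp [hp]
  | succ j ih =>
    rw [PySem.Chars.rfind.go]
    by_cases hp : [m].isPrefixOf (s.drop (j + 1))
    · refine ⟨by simp [hp]; omega, ?_⟩
      simp [hp]
    · simp only [hp, Bool.false_eq_true]
      apply ih
      obtain ⟨i, hi, hpi⟩ := h
      rcases Nat.lt_or_ge i (j + 1) with hlt | hge
      · exact ⟨i, Nat.lt_succ_iff.mp hlt, hpi⟩
      · rw [Nat.le_antisymm hi hge] at hpi
        exact absurd hpi hp

theorem head_eq_of_drop_cons {s : List Char} {m : Char} {x : Nat} (hx : x < s.length)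
    (t : List Char) (ht : s.drop x = m :: t) : s[x] = m := by
  rw [List.drop_eq_getElem_cons hx] at ht
  exact (List.cons.injEq _ _ _ _ ▸ ht : _ ∧ _).1

theorem rfind_spec_singleton (s : List Char) (m : Char) (hm : m ∈ s) :
    0 ≤ PySem.Chars.rfind s [m] ∧
      ∃ hr : (PySem.Chars.rfind s [m]).toNat < s.length,
        s[(PySem.Chars.rfind s [m]).toNat] = m := by
  obtain ⟨idx, hidx, hs⟩ := List.getElem_of_mem hm
  have hw : [m].isPrefixOf (s.drop idx) := by
    rw [List.isPrefixOf_iff_prefix, List.drop_eq_getElem_cons hidx, hs]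
    exact ⟨_, rfl⟩
  obtain ⟨h0, hpre⟩ := rfind_go_spec s m s.length ⟨idx, Nat.le_of_lt hidx, hw⟩
  rw [List.isPrefixOf_iff_prefix] at hpre
  obtain ⟨t, ht⟩ := hpre
  have hlt : (PySem.Chars.rfind.go s [m] s.length).toNat < s.length := by
    by_contra hge
    rw [List.drop_eq_nil_of_le (Nat.le_of_not_lt hge)] at ht
    simp at ht
  exact ⟨h0, hlt, head_eq_of_drop_cons hlt t ht.symm⟩

theorem find_spec_singleton (s : List Char) (m : Char) (hm : m ∈ s) :
    0 ≤ PySem.Chars.find s [m] ∧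
      ∃ hf : (PySem.Chars.find s [m]).toNat < s.length,
        s[(PySem.Chars.find s [m]).toNat] = m := by
  have hinf : [m] <:+: s := by
    obtain ⟨l, r, hlr⟩ := List.append_of_mem hm
    exact ⟨l, r, by simp [hlr]⟩
  have h0 : 0 ≤ PySem.Chars.find s [m] := (PySem.Chars.find_nonneg_iff s [m]).mpr hinf
  obtain ⟨hpre, -⟩ := PySem.Chars.find_spec h0
  obtain ⟨t, ht⟩ := hpre
  have hlt : (PySem.Chars.find s [m]).toNat < s.length := by
    by_contra hge
    rw [List.drop_eq_nil_of_le (Nat.le_of_not_lt hge)] at ht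
    simp at ht
  exact ⟨h0, hlt, head_eq_of_drop_cons hlt t ht.symm⟩

-- the per-index equality on the interior indices 0 < k < len - 1
theorem interior_eq (s : List Char) (m : Char)
    (hmax : PySem.List.max? s (fun x => x) = some m)
    (k : Nat) (hk : k < s.length) (hk0 : 0 < k) (hklast : k + 1 < s.length) :
    ((decide ((k : Int) ≤ PySem.Chars.find s [m]) &&
        decide (((PySem.List.max? (PySem.List.slice s none (some (k : Int))) (fun x => x)).getD m) < s[k]))
      = decide (((s.take k).foldl max '\x00') < s[k]))
    ∧ ((decide (PySem.Chars.rfind s [m] ≤ (k : Int)) &&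
        decide (((PySem.List.max? (PySem.List.slice s (some ((k : Int) + 1)) none) (fun x => x)).getD m) < s[k]))
      = decide (((s.drop (k + 1)).foldl max '\x00') < s[k])) := by
  have hm_mem : m ∈ s := PySem.List.max?_mem hmax
  have hj_le : s[k] ≤ m := PySem.List.max?_isMax hmax s[k] (List.getElem_mem hk)
  constructor
  · -- prefix disjunct
    obtain ⟨c, t, hct⟩ := List.exists_cons_of_ne_nil
      (List.ne_nil_of_length_pos (by rw [List.length_take]; omega) : s.take k ≠ [])
    have hmax_take : (PySem.List.max? (s.take k) (fun x => x)).getD m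
        = (s.take k).foldl max '\x00' := by
      rw [hct, PySem.List.max?_id_cons, foldl_max_nul]; rfl
    rw [PySem.List.slice_to_natCast, hmax_take]
    by_cases hf : (k : Int) ≤ PySem.Chars.find s [m]
    · simp [hf]
    · obtain ⟨h0, hflt, hfm⟩ := find_spec_singleton s m hm_mem
      have hfk : (PySem.Chars.find s [m]).toNat < k := by omega
      have hmem : m ∈ s.take k := by
        have hgt : (s.take k)[(PySem.Chars.find s [m]).toNat]'(by
            simp [List.length_take]; omega) = m := by
          rw [List.getElem_take]; exact hfm
        exact hgt ▸ List.getElem_mem _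
      have hPm : m ≤ (s.take k).foldl max '\x00' :=
        (PySem.List.le_foldl_max (s.take k) '\x00').2 m hmem
      simp [hf, not_lt.mpr (hj_le.trans hPm)]
  · -- suffix disjunct
    obtain ⟨c, t, hct⟩ := List.exists_cons_of_ne_nil
      (List.ne_nil_of_length_pos (by rw [List.length_drop]; omega) : s.drop (k + 1) ≠ [])
    have hmax_drop : (PySem.List.max? (s.drop (k + 1)) (fun x => x)).getD m
        = (s.drop (k + 1)).foldl max '\x00' := by
      rw [hct, PySem.List.max?_id_cons, foldl_max_nul]; rfl
    have hcast : ((k : Int) + 1) = ((k + 1 : Nat) : Int) := by push_cast; ring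
    rw [hcast, PySem.List.slice_from_natCast, hmax_drop]
    by_cases hr : PySem.Chars.rfind s [m] ≤ (k : Int)
    · simp [hr]
    · obtain ⟨h0, hrlt, hrm⟩ := rfind_spec_singleton s m hm_mem
      have hrk : k + 1 ≤ (PySem.Chars.rfind s [m]).toNat := by omega
      have hmem : m ∈ s.drop (k + 1) := by
        have hidx : k + 1 + ((PySem.Chars.rfind s [m]).toNat - (k + 1))
            = (PySem.Chars.rfind s [m]).toNat := by omega
        have hgt : (s.drop (k + 1))[(PySem.Chars.rfind s [m]).toNat - (k + 1)]'(by
            simp [List.length_drop]; omega) = m := by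
          rw [List.getElem_drop]
          simp only [hidx]
          exact hrm
        exact hgt ▸ List.getElem_mem _
      have hSm : m ≤ (s.drop (k + 1)).foldl max '\x00' :=
        (PySem.List.le_foldl_max (s.drop (k + 1)) '\x00').2 m hmem
      simp [hr, not_lt.mpr (hj_le.trans hSm)]

-- ===== VERDICT (by name: the statement is the Claim_ definition above) =====
theorem calculate_visibility_spec : Claim_equal_calculate_visibility := by
  intro trow hdom hpre
  unfold Spec_calculate_visibility
  have hs : trow.toList ≠ [] := by
    intro h
    apply hpre
    have h2 := congrArg String.ofList h
    rwa [String.ofList_toList] at h2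
  cases hmax : PySem.List.max? trow.toList (fun x => x) with
  | none => exact absurd ((PySem.List.max?_eq_none_iff _ _).mp hmax) hs
  | some m =>
    simp only [calculate_visibility, calculate_visibility_alt, hmax, scan_fold,
      List.nil_append]
    apply List.ext_getElem
    · simp [PySem.List.length_enumerate]
    intro k h1 h2
    have hk : k < trow.toList.length := by
      simpa [PySem.List.length_enumerate] using h1
    simp only [List.getElem_map, PySem.List.getElem_enumerate, zero_add]
    by_cases hk0 : k = 0
    · simp [hk0]
    by_cases hklast : k = trow.toList.length - 1
    · have hcast : (k : Int) = (trow.toList.length : Int) - 1 := by omega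
      simp [hcast]
    have hk1 : 0 < k := Nat.pos_of_ne_zero hk0
    have hk2 : k + 1 < trow.toList.length := by omega
    obtain ⟨e3, e4⟩ := interior_eq trow.toList m hmax k hk hk1 hk2
    rw [e3, e4]
    -- B side: evaluate the two array lookups
    have hpref : PySem.List.pyGetD (prefMaxes '\x00' trow.toList) (k : Int) '\x00'
        = (trow.toList.take k).foldl max '\x00' := by
      rw [PySem.List.pyGetD_natCast,
        List.getD_eq_getElem _ _ (by rw [prefMaxes_length]; exact hk),
        prefMaxes_getElem _ _ _ hk]
    have hsuf : PySem.List.pyGetD (prefMaxes '\x00' trow.toList.reverse).reverse (k : Int) '\x00'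
        = (trow.toList.drop (k + 1)).foldl max '\x00' := by
      have hlen : k < (prefMaxes '\x00' trow.toList.reverse).length := by
        rw [prefMaxes_length, List.length_reverse]; exact hk
      rw [PySem.List.pyGetD_natCast,
        List.getD_eq_getElem _ _ (by simpa using hlen),
        List.getElem_reverse]
      have hidx : (prefMaxes '\x00' trow.toList.reverse).length - 1 - k
          < trow.toList.reverse.length := by
        rw [prefMaxes_length] at *
        simp only [List.length_reverse] at *
        omega
      rw [prefMaxes_getElem _ _ _ hidx]
      have htake : trow.toList.reverse.take ((prefMaxes '\x00' trow.toList.reverse).length - 1 - k)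
          = (trow.toList.drop (k + 1)).reverse := by
        rw [List.reverse_drop, prefMaxes_length, List.length_reverse]
        congr 1
        omega
      rw [htake, foldl_max_reverse]
    rw [hpref, hsuf]
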